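-- pv_equiv track=rewrite | github.com/JBSEnovs/hope | agents/image_analyzer.py | _compress_histogram
-- ===== SOURCE A (Python) =====
-- def _compress_histogram(histogram, bins=10):
--     """
--     Compress a 256-bin histogram to fewer bins for easier analysis.
--
--     Args:
--         histogram (list): 256-bin histogram
--         bins (int): Number of bins to compress to
--
--     Returns:
--         dict: Compressed histogram
--     """
--     bin_size = 256 // bins
--     compressed = [0] * bins
--
--     for i, count in enumerate(histogram):
--         bin_index = min(i // bin_size, bins - 1)
--         compressed[bin_index] += count
--
--     # Convert to dictionary for readability
--     result = {}
--     for i, count in enumerate(compressed):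
--         lower = i * bin_size
--         upper = min((i + 1) * bin_size - 1, 255)
--         result[f"{lower}-{upper}"] = count
--
--     return result
-- ===== SOURCE B (Python) =====
-- def _compress_histogram(histogram, bins=10):
--     """Compress a 256-bin histogram to fewer bins (bin-major slice sums)."""
--     bin_size = 256 // bins
--     result = {}
--     for i in range(bins):
--         lo = i * bin_size
--         if i < bins - 1:
--             value = sum(histogram[lo:lo + bin_size])
--         else:
--             value = sum(histogram[lo:])
--         result[f"{lo}-{min((i + 1) * bin_size - 1, 255)}"] = value
--     return result
-- ===== Notes on version B (the rewrite author's own statement) =====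
-- stated objective: alternative
-- what changed: A scatters each of the 256 input counts into a bins-sized accumulator array and then converts it to a dict; B loops over the output bins directly, computing each bin's value as one slice sum (with the last bin taking the whole tail) and building the dict in the same single loop.
-- outside the precondition, e.g. on _compress_histogram([], 300): A returns {'0--1': 0}, B returns {'0--1': 0}
import Mathlib
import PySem

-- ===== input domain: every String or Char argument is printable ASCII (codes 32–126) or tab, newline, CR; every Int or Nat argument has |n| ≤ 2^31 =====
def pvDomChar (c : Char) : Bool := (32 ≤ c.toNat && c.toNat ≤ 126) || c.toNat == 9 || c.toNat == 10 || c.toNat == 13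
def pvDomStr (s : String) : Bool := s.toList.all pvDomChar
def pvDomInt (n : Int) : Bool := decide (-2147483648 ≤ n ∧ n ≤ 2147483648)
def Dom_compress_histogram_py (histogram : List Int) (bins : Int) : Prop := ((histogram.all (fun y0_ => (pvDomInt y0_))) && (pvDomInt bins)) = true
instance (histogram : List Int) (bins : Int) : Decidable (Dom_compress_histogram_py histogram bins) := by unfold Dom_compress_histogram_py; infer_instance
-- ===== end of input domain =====

-- B builds each output bin directly as one slice sum instead of scattering all counts into an accumulator array (alternative decomposition, same cost).


-- ===== PORT A =====
-- A-side helper: the body of A's scatter loop (compressed[bin_index] += count)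
def pvAStep (bins bin_size : Int) (comp : List Int) (p : Int × Int) : List Int :=
  let bin_index := min (PySem.Int.floordiv p.1 bin_size) (bins - 1)
  PySem.List.pySetD comp bin_index (PySem.List.pyGetD comp bin_index 0 + p.2)

def compress_histogram_py (histogram : List Int) (bins : Int) : List (String × Int) :=
  let bin_size := PySem.Int.floordiv 256 bins
  let compressed :=
    (PySem.List.enumerate histogram).foldl (pvAStep bins bin_size) (PySem.List.pyRepeat [0] bins)
  ((PySem.List.enumerate compressed).foldl
    (fun (r : PySem.Dict String Int) (p : Int × Int) =>
      let lower := p.1 * bin_size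
      let upper := min ((p.1 + 1) * bin_size - 1) 255
      r.insert (PySem.Int.toStr lower ++ "-" ++ PySem.Int.toStr upper) p.2)
    PySem.Dict.empty).items

-- ===== PORT B =====
def compress_histogram_py_alt (histogram : List Int) (bins : Int) : List (String × Int) :=
  let bin_size := PySem.Int.floordiv 256 bins
  ((PySem.List.pyRange 0 bins 1).foldl
    (fun (r : PySem.Dict String Int) (i : Int) =>
      let lo := i * bin_size
      let value := if i < bins - 1
        then (PySem.List.slice histogram (some lo) (some (lo + bin_size))).sum
        else (PySem.List.slice histogram (some lo) none).sum
      r.insert (PySem.Int.toStr lo ++ "-" ++ PySem.Int.toStr (min ((i + 1) * bin_size - 1) 255)) value)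
    PySem.Dict.empty).items

-- ===== PRECONDITION & SPEC =====
-- Pre_ excludes exactly the inputs on which A raises (bins = 0: ZeroDivisionError; bins < 0 or
-- bins > 256 with a non-empty histogram: IndexError / ZeroDivisionError), plus bins > 256 with an
-- EMPTY histogram, where A happens to return the degenerate duplicate-key dict {'0--1': 0} — an
-- accidental artefact of a zero bin width (B returns the same value there, but A also allocates a
-- bins-sized accumulator array, which for huge bins is not a behaviour worth specifying).
def Pre_compress_histogram_py (histogram : List Int) (bins : Int) : Prop :=
  (1 ≤ bins ∧ bins ≤ 256) ∨ (histogram = [] ∧ bins < 0)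
instance (histogram : List Int) (bins : Int) : Decidable (Pre_compress_histogram_py histogram bins) := by unfold Pre_compress_histogram_py; infer_instance

def pvWitness_compress_histogram_py : List Int × Int := ([1, 2, 3], 2)

def Spec_compress_histogram_py (histogram : List Int) (bins : Int) (out : List (String × Int)) : Prop := out = compress_histogram_py_alt histogram bins
instance (histogram : List Int) (bins : Int) (out : List (String × Int)) : Decidable (Spec_compress_histogram_py histogram bins out) := by unfold Spec_compress_histogram_py; infer_instance

-- ===== CLAIM (what is proved, stated in full; the proofs are below) =====
def Claim_equal_compress_histogram_py : Prop := ∀ (histogram : List Int) (bins : Int), Dom_compress_histogram_py histogram bins → Pre_compress_histogram_py histogram bins → Spec_compress_histogram_py histogram bins (compress_histogram_py histogram bins)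

-- ===== LEMMAS AND PROOFS =====

-- Sum of the elements of l whose absolute position (counting from k) satisfies q.
def pvSumIf (q : Nat → Bool) : List Int → Nat → Int
  | [], _ => 0
  | c :: t, k => (if q k then c else 0) + pvSumIf q t (k + 1)

lemma pvSumIf_congr (q q' : Nat → Bool) (h : ∀ i, q i = q' i) :
    ∀ (l : List Int) (k : Nat), pvSumIf q l k = pvSumIf q' l k := by
  intro l
  induction l with
  | nil => intro k; rfl
  | cons c t ih => intro k; simp [pvSumIf, h, ih]

lemma pvSumIf_lt (b : Nat) :
    ∀ (l : List Int) (k : Nat), pvSumIf (fun i => decide (i < b)) l k = (l.take (b - k)).sum := by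
  intro l
  induction l with
  | nil => intro k; simp [pvSumIf]
  | cons c t ih =>
    intro k
    by_cases h : k < b
    · have hb : b - k = (b - (k + 1)) + 1 := by omega
      simp [pvSumIf, h, ih, hb, List.take_succ_cons]
    · have hb : b - k = 0 := by omega
      have hb1 : b - (k + 1) = 0 := by omega
      simp [pvSumIf, h, ih, hb, hb1]

lemma pvSumIf_le (a : Nat) :
    ∀ (l : List Int) (k : Nat), pvSumIf (fun i => decide (a ≤ i)) l k = (l.drop (a - k)).sum := by
  intro l
  induction l with
  | nil => intro k; simp [pvSumIf]
  | cons c t ih =>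
    intro k
    by_cases h : a ≤ k
    · have hb : a - k = 0 := by omega
      have hb1 : a - (k + 1) = 0 := by omega
      simp [pvSumIf, h, ih, hb, hb1]
    · have hb : a - k = (a - (k + 1)) + 1 := by omega
      simp [pvSumIf, h, ih, hb]

lemma pvSumIf_split (a b : Nat) (hab : a ≤ b) :
    ∀ (l : List Int) (k : Nat),
      pvSumIf (fun i => decide (i < b)) l k
        = pvSumIf (fun i => decide (i < a)) l k + pvSumIf (fun i => decide (a ≤ i ∧ i < b)) l k := by
  intro l
  induction l with
  | nil => intro k; simp [pvSumIf]
  | cons c t ih =>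
    intro k
    simp only [pvSumIf, ih]
    split_ifs <;> simp_all <;> omega

lemma pvSumIf_interval (l : List Int) (a b : Nat) (hab : a ≤ b) :
    pvSumIf (fun i => decide (a ≤ i ∧ i < b)) l 0 = ((l.drop a).take (b - a)).sum := by
  have h := pvSumIf_split a b hab l 0
  rw [pvSumIf_lt, pvSumIf_lt] at h
  have htake : l.take b = l.take a ++ (l.drop a).take (b - a) := by
    conv_lhs => rw [show b = a + (b - a) by omega]
    rw [List.take_add]
  simp only [Nat.sub_zero, htake, List.sum_append] at h
  omega

lemma pvGetD_set (l : List Int) (i j : Nat) (a d : Int) (h : i < l.length) :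
    (l.set i a).getD j d = if i = j then a else l.getD j d := by
  simp [List.getD, List.getElem?_set, h]
  split_ifs with h1 <;> simp

lemma pvScatter_length (bins bin_size : Int) :
    ∀ (ps : List (Int × Int)) (comp : List Int),
      (ps.foldl (pvAStep bins bin_size) comp).length = comp.length := by
  intro ps
  induction ps with
  | nil => intro comp; rfl
  | cons p t ih => intro comp; simp [List.foldl_cons, ih, pvAStep, PySem.List.length_pySetD]

lemma pvScatter_getD (nN bsN : Nat) (hn : 1 ≤ nN) (_hbs : 1 ≤ bsN) :
    ∀ (l : List Int) (k : Nat) (comp : List Int), comp.length = nN →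
      ∀ j : Nat, j < nN →
        ((PySem.List.enumerate l (k : Int)).foldl (pvAStep (nN : Int) (bsN : Int)) comp).getD j 0
          = comp.getD j 0 + pvSumIf (fun i => decide (min (i / bsN) (nN - 1) = j)) l k := by
  intro l
  induction l with
  | nil => intro k comp hlen j hj; simp [PySem.List.enumerate_nil, pvSumIf]
  | cons c t ih =>
    intro k comp hlen j hj
    rw [PySem.List.enumerate_cons]
    have hcast : (k : Int) + 1 = ((k + 1 : Nat) : Int) := by push_cast; ring
    rw [List.foldl_cons, hcast]
    set j0 : Nat := min (k / bsN) (nN - 1) with hj0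
    have hj0lt : j0 < nN := by omega
    have hstep : pvAStep (nN : Int) (bsN : Int) comp ((k : Int), c)
        = comp.set j0 (comp.getD j0 0 + c) := by
      show PySem.List.pySetD comp (min (PySem.Int.floordiv (k : Int) (bsN : Int)) ((nN : Int) - 1)) _ = _
      have hidx : min (PySem.Int.floordiv (k : Int) (bsN : Int)) ((nN : Int) - 1) = ((j0 : Nat) : Int) := by
        rw [PySem.Int.floordiv_natCast]
        rw [hj0]
        push_cast [Nat.cast_min, Nat.cast_sub hn]
        ring_nf
      rw [hidx, PySem.List.pySetD_natCast, PySem.List.pyGetD_natCast]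
    rw [hstep, ih (k + 1) _ (by simp [hlen]) j hj]
    rw [pvGetD_set _ _ _ _ _ (by omega)]
    show _ = _ + pvSumIf _ (c :: t) k
    simp only [pvSumIf, ← hj0]
    by_cases he : j0 = j
    · simp [he]; ring
    · simp [he]

lemma pvDivBracket (bsN i m : Nat) (hbs : 1 ≤ bsN) :
    i / bsN = m ↔ m * bsN ≤ i ∧ i < m * bsN + bsN := by
  constructor
  · rintro rfl
    have h1 := Nat.div_mul_le_self i bsN
    have h2 := Nat.div_add_mod i bsN
    have h3 : i % bsN < bsN := Nat.mod_lt _ (by omega : 0 < bsN)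
    rw [Nat.mul_comm] at h2
    omega
  · rintro ⟨h1, h2⟩
    exact Nat.div_eq_of_lt_le h1 (by rw [Nat.succ_mul]; omega)

lemma pvCond_mid (bsN nN j : Nat) (hbs : 1 ≤ bsN) (hj : j < nN - 1) (i : Nat) :
    (decide (min (i / bsN) (nN - 1) = j)) = (decide (j * bsN ≤ i ∧ i < j * bsN + bsN)) := by
  simp only [decide_eq_decide]
  have h1 : (min (i / bsN) (nN - 1) = j) ↔ i / bsN = j := by omega
  rw [h1, pvDivBracket bsN i j hbs]

lemma pvCond_last (bsN nN : Nat) (hbs : 1 ≤ bsN) (i : Nat) :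
    (decide (min (i / bsN) (nN - 1) = nN - 1)) = (decide ((nN - 1) * bsN ≤ i)) := by
  simp only [decide_eq_decide]
  have h1 : (min (i / bsN) (nN - 1) = nN - 1) ↔ nN - 1 ≤ i / bsN := by omega
  rw [h1, Nat.le_div_iff_mul_le (by omega : 0 < bsN)]

-- A's scatter array evaluated at bin xN equals B's per-bin slice sum.
lemma pvBinValue (histogram : List Int) (nN bsN : Nat) (hn : 1 ≤ nN) (hbs : 1 ≤ bsN)
    (xN : Nat) (hx : xN < nN) :
    ((PySem.List.enumerate histogram (0 : Int)).foldl
        (pvAStep (nN : Int) (bsN : Int)) (List.replicate nN (0 : Int))).getD xN 0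
      = if (xN : Int) < (nN : Int) - 1
        then (PySem.List.slice histogram (some ((xN : Int) * (bsN : Int)))
                (some ((xN : Int) * (bsN : Int) + (bsN : Int)))).sum
        else (PySem.List.slice histogram (some ((xN : Int) * (bsN : Int))) none).sum := by
  have hsc := pvScatter_getD nN bsN hn hbs histogram 0 (List.replicate nN (0 : Int)) (by simp) xN hx
  simp only [Nat.cast_zero] at hsc
  rw [hsc]
  have hrep : (List.replicate nN (0 : Int)).getD xN 0 = 0 := by
    simp [List.getD]
  rw [hrep]
  have hc : (xN : Int) * (bsN : Int) = ((xN * bsN : Nat) : Int) := by push_cast; ring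
  by_cases hxl : xN < nN - 1
  · rw [pvSumIf_congr _ _ (pvCond_mid bsN nN xN hbs hxl)]
    rw [pvSumIf_interval histogram _ _ (by omega)]
    rw [if_pos (by omega)]
    rw [hc, PySem.List.slice_natCast_add]
    simp
  · have hxe : xN = nN - 1 := by omega
    rw [if_neg (by omega), hxe]
    rw [pvSumIf_congr _ _ (pvCond_last bsN nN hbs)]
    rw [pvSumIf_le, Nat.sub_zero]
    have hc2 : (((nN - 1 : Nat)) : Int) * (bsN : Int) = (((nN - 1) * bsN : Nat) : Int) := by
      push_cast; ring
    rw [hc2, PySem.List.slice_from_natCast]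
    omega

-- ===== VERDICT (by name: the statement is the Claim_ definition above) =====
theorem compress_histogram_py_spec : Claim_equal_compress_histogram_py := by
  intro histogram bins _ hpre
  unfold Spec_compress_histogram_py
  rcases hpre with ⟨h1, h2⟩ | ⟨he, hneg⟩
  · -- 1 ≤ bins ≤ 256
    simp only [compress_histogram_py, compress_histogram_py_alt]
    have hbseq : PySem.Int.floordiv 256 bins = 256 / bins :=
      PySem.Int.floordiv_eq_ediv_of_pos (by omega)
    have hbspos : 1 ≤ 256 / bins := by
      rw [Int.le_ediv_iff_mul_le (by omega : (0 : Int) < bins)]; omega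
    have hbinsc : ((bins.toNat : Nat) : Int) = bins := Int.toNat_of_nonneg (by omega)
    have hbsc : (((PySem.Int.floordiv 256 bins).toNat : Nat) : Int) = PySem.Int.floordiv 256 bins :=
      Int.toNat_of_nonneg (by omega)
    set nN := bins.toNat with hnN
    set bsN := (PySem.Int.floordiv 256 bins).toNat with hbsN
    have hn : 1 ≤ nN := by omega
    have hbs : 1 ≤ bsN := by omega
    rw [← hbsc, ← hbinsc, PySem.List.pyRepeat_singleton, Int.toNat_natCast]
    set compressed := (PySem.List.enumerate histogram).foldl
        (pvAStep (nN : Int) (bsN : Int)) (List.replicate nN (0 : Int)) with hcompd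
    have hclen : compressed.length = nN := by
      rw [hcompd, pvScatter_length]; simp
    have hlen2 : PySem.List.len compressed = ((nN : Nat) : Int) := by
      simp [hclen]
    rw [PySem.List.enumerate_eq_map_pyRange compressed 0, hlen2, List.foldl_map]
    congr 1
    apply PySem.List.foldl_congr_mem
    intro acc x hxmem
    rw [PySem.List.mem_pyRange_one] at hxmem
    obtain ⟨xN, rfl⟩ : ∃ m : Nat, x = (m : Int) :=
      ⟨x.toNat, (Int.toNat_of_nonneg hxmem.1).symm⟩
    have hxlt : xN < nN := by exact_mod_cast hxmem.2
    rw [PySem.List.pyGetD_natCast, hcompd, pvBinValue histogram nN bsN hn hbs xN hxlt]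
  · subst he
    simp [compress_histogram_py, compress_histogram_py_alt,
      PySem.List.enumerate_nil, PySem.List.pyRepeat_singleton,
      Int.toNat_of_nonpos (by omega : bins ≤ 0),
      PySem.List.pyRange_one_eq_nil (by omega : bins ≤ 0)]
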